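-- pv_equiv track=rewrite | github.com/eliottcassidy2000/math | 04-computation/permanent_forbidden_h.py | explain_infeasibility
-- ===== SOURCE A (Python) =====
-- from math import comb
--
-- def explain_infeasibility(H):
--     """Detailed explanation of why H is infeasible."""
--     T = (H - 1) // 2
--
--     max_k = 1
--     while 2**max_k <= T:
--         max_k += 1
--
--     reasons = []
--
--     def search_with_reasons(k, remaining, partial):
--         if k == 0:
--             if remaining == 0:
--                 d = dict(partial)
--                 a1 = d.get(1, 0)
--                 a2 = d.get(2, 0)
--
--                 for kk, vv in d.items():
--                     if kk >= 2 and vv > 0 and a1 < kk: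
--                         parts = ", ".join(f"a{kk2}={vv2}" for kk2, vv2 in sorted(d.items()) if vv2 > 0)
--                         reasons.append(f"({parts}): a_{kk}>0 forces a_1>={kk} but a_1={a1}")
--                         return
--
--                 for kk, vv in d.items():
--                     if kk >= 2 and vv > 0 and a2 < comb(kk, 2):
--                         parts = ", ".join(f"a{kk2}={vv2}" for kk2, vv2 in sorted(d.items()) if vv2 > 0)
--                         reasons.append(f"({parts}): a_{kk}>0 forces a_2>={comb(kk,2)} but a_2={a2}")
--                         return
--
--                 if a2 > 0 and a1 < 2:
--                     parts = ", ".join(f"a{kk2}={vv2}" for kk2, vv2 in sorted(d.items()) if vv2 > 0)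
--                     reasons.append(f"({parts}): a_2>0 forces a_1>=2 but a_1={a1}")
--                     return
--             return
--
--         max_val = remaining // (2**(k-1))
--         for v in range(max_val + 1):
--             search_with_reasons(k - 1, remaining - v * 2**(k-1), partial + [(k, v)])
--
--     search_with_reasons(max_k, T, [])
--     return reasons
-- ===== SOURCE B (Python) =====
-- from math import comb
--
-- def explain_infeasibility(H):
--     """Detailed explanation of why H is infeasible (level-by-level enumeration + second-pass checks)."""
--     T = (H - 1) // 2
--     max_k = T.bit_length() if T > 0 else 1
--
--     # Build all leaf partitions breadth-wise, one level per part size k,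
--     # keeping lexicographic (= DFS) order.
--     frames = [([], T)]
--     for k in range(max_k, 0, -1):
--         w = 2 ** (k - 1)
--         frames = [(vals + [(k, v)], rem - v * w)
--                   for vals, rem in frames
--                   for v in range(rem // w + 1)]
--     leaves = [vals for vals, rem in frames if rem == 0]
--
--     reasons = []
--     for vals in leaves:
--         r = leaf_reason(vals)
--         if r is not None:
--             reasons.append(r)
--     return reasons
--
-- def leaf_reason(vals):
--     a1 = next((v for k, v in vals if k == 1), 0)
--     a2 = next((v for k, v in vals if k == 2), 0)
--     pos = [(k, v) for k, v in vals if v > 0]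
--     parts = ", ".join(f"a{k}={v}" for k, v in reversed(pos))
--     for k, _ in pos:
--         if k >= 2 and a1 < k:
--             return f"({parts}): a_{k}>0 forces a_1>={k} but a_1={a1}"
--     for k, _ in pos:
--         if k >= 2 and a2 < comb(k, 2):
--             return f"({parts}): a_{k}>0 forces a_2>={comb(k, 2)} but a_2={a2}"
--     if a2 > 0 and a1 < 2:
--         return f"({parts}): a_2>0 forces a_1>=2 but a_1={a1}"
--     return None
-- ===== Notes on version B (the rewrite author's own statement) =====
-- stated objective: alternative
-- what changed: A's recursive backtracking search (with a closure-mutated reasons list and per-leaf early returns) is replaced by an iterative level-by-level construction of all leaf partitions followed by a separate second pass that derives at most one reason per leaf via a total Option-returning checker; the while-loop bound is replaced by bit_length.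
import Mathlib
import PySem

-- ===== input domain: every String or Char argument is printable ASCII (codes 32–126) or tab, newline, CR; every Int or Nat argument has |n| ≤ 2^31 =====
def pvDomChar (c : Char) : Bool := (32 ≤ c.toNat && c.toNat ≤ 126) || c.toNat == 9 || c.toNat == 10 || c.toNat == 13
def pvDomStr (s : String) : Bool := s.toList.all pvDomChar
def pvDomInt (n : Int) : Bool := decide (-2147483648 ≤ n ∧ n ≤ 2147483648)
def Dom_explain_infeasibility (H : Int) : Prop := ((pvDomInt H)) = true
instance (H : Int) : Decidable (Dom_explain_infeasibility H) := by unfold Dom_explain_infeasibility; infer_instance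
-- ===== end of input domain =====

-- B replaces A's recursive DFS by an iterative level-by-level construction of all leaf partitions
-- followed by a second pass that checks each leaf; same return value, stated objective: alternative.

-- ===== PORT A =====

-- math.comb(n, 2); exact for n ≥ 0, and both programs only call it with n ≥ 2
def pvComb2 (n : Int) : Int := (Nat.choose n.toNat 2 : Int)

-- ", ".join(f"a{kk2}={vv2}" for kk2, vv2 in sorted(d.items()) if vv2 > 0);
-- dict items have pairwise-distinct keys, so Python's lexicographic tuple sort (stable)
-- is exactly the stable sort by first component used here.
def pvPartsA (d : PySem.Dict Int Int) : String :=
  PySem.Str.join ", "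
    (((PySem.List.sorted d.items (fun p => p.1)).filter (fun p => decide (0 < p.2))).map
      (fun p => "a" ++ PySem.Int.toStr p.1 ++ "=" ++ PySem.Int.toStr p.2))

-- the body of A's leaf case (k == 0, remaining == 0): three scans, each appending at most one reason
def pvLeafA (part : List (Int × Int)) (reasons : List String) : List String :=
  let d := PySem.Dict.ofList part
  let a1 := d.getD 1 0
  let a2 := d.getD 2 0
  match d.items.find? (fun p => decide (2 ≤ p.1) && decide (0 < p.2) && decide (a1 < p.1)) with
  | some p => reasons ++ ["(" ++ pvPartsA d ++ "): a_" ++ PySem.Int.toStr p.1 ++ ">0 forces a_1>=" ++ PySem.Int.toStr p.1 ++ " but a_1=" ++ PySem.Int.toStr a1]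
  | none =>
  match d.items.find? (fun p => decide (2 ≤ p.1) && decide (0 < p.2) && decide (a2 < pvComb2 p.1)) with
  | some p => reasons ++ ["(" ++ pvPartsA d ++ "): a_" ++ PySem.Int.toStr p.1 ++ ">0 forces a_2>=" ++ PySem.Int.toStr (pvComb2 p.1) ++ " but a_2=" ++ PySem.Int.toStr a2]
  | none =>
  if 0 < a2 ∧ a1 < 2 then
    reasons ++ ["(" ++ pvPartsA d ++ "): a_2>0 forces a_1>=2 but a_1=" ++ PySem.Int.toStr a1]
  else reasons

-- search_with_reasons(k, remaining, partial); the mutated closure list `reasons` is threaded through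
def pvSearchA : Nat → Int → List (Int × Int) → List String → List String
  | 0, remaining, part, reasons => if remaining = 0 then pvLeafA part reasons else reasons
  | k+1, remaining, part, reasons =>
      let max_val := PySem.Int.floordiv remaining ((2:Int) ^ k)
      (PySem.List.pyRange 0 (max_val + 1) 1).foldl
        (fun acc v => pvSearchA k (remaining - v * (2:Int) ^ k) (part ++ [(((k:Int) + 1), v)]) acc)
        reasons

-- while 2**max_k <= T: max_k += 1
def pvWhileMaxK (T : Int) (max_k : Nat) : Nat :=
  if (2:Int) ^ max_k ≤ T then pvWhileMaxK T (max_k + 1) else max_k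
termination_by T.toNat + 1 - max_k
decreasing_by
  have h2 : (max_k : Int) < (2:Int) ^ max_k := by
    calc (max_k : Int) < ((2 ^ max_k : Nat) : Int) := by exact_mod_cast Nat.lt_two_pow_self
    _ = (2:Int) ^ max_k := by push_cast; ring
  have h3 : (max_k : Int) < T := lt_of_lt_of_le h2 (by assumption)
  omega

def explain_infeasibility (H : Int) : List String :=
  let T := PySem.Int.floordiv (H - 1) 2
  let max_k := pvWhileMaxK T 1
  pvSearchA max_k T [] []

-- ===== PORT B =====

-- leaf_reason(vals)
def pvLeafB (vals : List (Int × Int)) : Option String :=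
  let a1 := ((vals.find? (fun p => p.1 == 1)).map (fun p => p.2)).getD 0
  let a2 := ((vals.find? (fun p => p.1 == 2)).map (fun p => p.2)).getD 0
  let pos := vals.filter (fun p => decide (0 < p.2))
  let parts := PySem.Str.join ", "
    (pos.reverse.map (fun p => "a" ++ PySem.Int.toStr p.1 ++ "=" ++ PySem.Int.toStr p.2))
  match pos.find? (fun p => decide (2 ≤ p.1) && decide (a1 < p.1)) with
  | some p => some ("(" ++ parts ++ "): a_" ++ PySem.Int.toStr p.1 ++ ">0 forces a_1>=" ++ PySem.Int.toStr p.1 ++ " but a_1=" ++ PySem.Int.toStr a1)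
  | none =>
  match pos.find? (fun p => decide (2 ≤ p.1) && decide (a2 < pvComb2 p.1)) with
  | some p => some ("(" ++ parts ++ "): a_" ++ PySem.Int.toStr p.1 ++ ">0 forces a_2>=" ++ PySem.Int.toStr (pvComb2 p.1) ++ " but a_2=" ++ PySem.Int.toStr a2)
  | none =>
  if 0 < a2 ∧ a1 < 2 then
    some ("(" ++ parts ++ "): a_2>0 forces a_1>=2 but a_1=" ++ PySem.Int.toStr a1)
  else none

-- one level of the frame construction: the body of B's `for k in range(max_k, 0, -1)` loop
-- (k ≥ 1 on every call, so the Nat exponent (k-1).toNat is exact)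
def pvStepB (k : Int) (frames : List (List (Int × Int) × Int)) : List (List (Int × Int) × Int) :=
  let w := (2:Int) ^ (k - 1).toNat
  frames.flatMap (fun f =>
    (PySem.List.pyRange 0 (PySem.Int.floordiv f.2 w + 1) 1).map (fun v => (f.1 ++ [(k, v)], f.2 - v * w)))

def explain_infeasibility_alt (H : Int) : List String :=
  let T := PySem.Int.floordiv (H - 1) 2
  -- T.bit_length() if T > 0 else 1
  let max_k : Nat := if 0 < T then PySem.Int.bitLength T else 1
  let frames := (PySem.List.pyRange (max_k : Int) 0 (-1)).foldl (fun fs k => pvStepB k fs) [([], T)]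
  let leaves := (frames.filter (fun f => f.2 == 0)).map (fun f => f.1)
  leaves.foldl (fun acc vals => match pvLeafB vals with | some r => acc ++ [r] | none => acc) []

-- ===== PRECONDITION & SPEC =====
def Spec_explain_infeasibility (H : Int) (out : List String) : Prop := out = explain_infeasibility_alt H
instance (H : Int) (out : List String) : Decidable (Spec_explain_infeasibility H out) := by unfold Spec_explain_infeasibility; infer_instance

-- ===== CLAIM (what is proved, stated in full; the proofs are below) =====
def Claim_equal_explain_infeasibility : Prop := ∀ (H : Int), Dom_explain_infeasibility H → Spec_explain_infeasibility H (explain_infeasibility H)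

-- ===== LEMMAS AND PROOFS =====

-- the DFS tree of frames that A's recursion visits (leaves only), used to relate both ports
def pvDfs : Nat → Int → List (Int × Int) → List (List (Int × Int) × Int)
  | 0, rem, vals => [(vals, rem)]
  | k+1, rem, vals =>
      (PySem.List.pyRange 0 (PySem.Int.floordiv rem ((2:Int) ^ k) + 1) 1).flatMap
        (fun v => pvDfs k (rem - v * (2:Int) ^ k) (vals ++ [(((k:Int) + 1), v)]))

def pvLeafCheck (f : List (Int × Int) × Int) : Option String :=
  if f.2 = 0 then pvLeafB f.1 else none

theorem pvFindFilter {α : Type} (q p : α → Bool) (l : List α) :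
    (l.filter q).find? p = l.find? (fun a => q a && p a) := by
  induction l with
  | nil => simp
  | cons x xs ih =>
    by_cases hq : q x <;> by_cases hp : p x <;>
      simp [hq, hp, ih]

theorem pvFoldOpt (l : List (List (Int × Int))) (acc : List String) :
    l.foldl (fun acc vals => match pvLeafB vals with | some r => acc ++ [r] | none => acc) acc
      = acc ++ l.filterMap pvLeafB := by
  induction l generalizing acc with
  | nil => simp
  | cons x xs ih =>
    cases hfx : pvLeafB x <;> simp [hfx, ih]

theorem pvFilterMapFst (fr : List (List (Int × Int) × Int)) :
    ((fr.filter (fun f => f.2 == 0)).map (fun f => f.1)).filterMap pvLeafB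
      = fr.filterMap pvLeafCheck := by
  induction fr with
  | nil => simp
  | cons x xs ih =>
    by_cases hx : x.2 = 0 <;>
      simp [hx, pvLeafCheck, ih, List.filterMap_cons]

-- A's dict at a leaf: the keys of `part` are pairwise distinct, so dict(part).items() == part
theorem pvItemsOfList (part : List (Int × Int)) (h : (part.map Prod.fst).Nodup) :
    (PySem.Dict.ofList part).items = part := by
  have := PySem.Dict.items_foldl_insert_fresh part Prod.fst Prod.snd PySem.Dict.empty
    (fun a _ => by simp) h
  simpa [PySem.Dict.ofList, PySem.Dict.update] using this

-- the leaf logic of the two ports agrees whenever the keys are strictly descending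
theorem pvLeaf_eq (vals : List (Int × Int)) (reasons : List String)
    (h : (vals.map Prod.fst).Pairwise (· > ·)) :
    pvLeafA vals reasons = reasons ++ (pvLeafB vals).toList := by
  have hnodup : (vals.map Prod.fst).Nodup := h.imp (fun hab => ne_of_gt hab)
  have hitems : (PySem.Dict.ofList vals).items = vals := pvItemsOfList vals hnodup
  have hpair : vals.Pairwise (fun a b => a.1 > b.1) := (List.pairwise_map).1 h
  have hsort : PySem.List.sorted vals (fun p => p.1) = vals.reverse :=
    PySem.List.sorted_eq_of_perm_of_pairwise_lt _ _ _ (vals.reverse_perm)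
      ((List.pairwise_reverse).2 hpair)
  have hp1 : ∀ (c : Int), (fun (p : Int × Int) => decide (2 ≤ p.1) && decide (0 < p.2) && decide (c < p.1))
      = (fun p => decide (0 < p.2) && (decide (2 ≤ p.1) && decide (c < p.1))) := by
    intro c; funext a
    by_cases h1 : 2 ≤ a.1 <;> by_cases h2 : 0 < a.2 <;> by_cases h3 : c < a.1 <;> simp [h1, h2, h3]
  have hp2 : ∀ (c : Int), (fun (p : Int × Int) => decide (2 ≤ p.1) && decide (0 < p.2) && decide (c < pvComb2 p.1))
      = (fun p => decide (0 < p.2) && (decide (2 ≤ p.1) && decide (c < pvComb2 p.1))) := by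
    intro c; funext a
    by_cases h1 : 2 ≤ a.1 <;> by_cases h2 : 0 < a.2 <;> by_cases h3 : c < pvComb2 a.1 <;> simp [h1, h2, h3]
  simp only [pvLeafA, pvLeafB, PySem.Dict.getD, PySem.Dict.get?, hitems, pvPartsA, hsort,
    List.filter_reverse, pvFindFilter, hp1, hp2]
  cases (vals.find? (fun p => decide (0 < p.2) &&
      (decide (2 ≤ p.1) && decide (((Option.map (fun p : Int × Int => p.2) (vals.find? (fun p => p.1 == 1))).getD 0) < p.1)))) with
  | some p => simp
  | none =>
    cases (vals.find? (fun p => decide (0 < p.2) &&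
        (decide (2 ≤ p.1) && decide (((Option.map (fun p : Int × Int => p.2) (vals.find? (fun p => p.1 == 2))).getD 0) < pvComb2 p.1)))) with
    | some p => simp
    | none => split_ifs <;> simp

-- A's recursion, started at a frame with strictly descending keys all above k,
-- produces exactly the checked leaves of the DFS tree below that frame
theorem pvSearchA_eq (k : Nat) : ∀ (rem : Int) (vals : List (Int × Int)) (acc : List String),
    (vals.map Prod.fst).Pairwise (· > ·) →
    (∀ x ∈ vals.map Prod.fst, (k : Int) < x) →
    pvSearchA k rem vals acc = acc ++ (pvDfs k rem vals).filterMap pvLeafCheck := by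
  induction k with
  | zero =>
    intro rem vals acc h _
    by_cases hrem : rem = 0
    · simp [pvSearchA, pvDfs, pvLeafCheck, hrem, pvLeaf_eq vals acc h,
        List.filterMap_cons, List.filterMap_nil]
      cases pvLeafB vals <;> rfl
    · simp [pvSearchA, pvDfs, pvLeafCheck, hrem]
  | succ k ih =>
    intro rem vals acc h hlt
    have hbody : (fun (acc : List String) (v : Int) =>
        pvSearchA k (rem - v * (2:Int) ^ k) (vals ++ [(((k:Int) + 1), v)]) acc)
        = fun acc v => acc ++ (pvDfs k (rem - v * (2:Int) ^ k) (vals ++ [(((k:Int) + 1), v)])).filterMap pvLeafCheck := by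
      funext a v
      apply ih
      · rw [List.map_append, List.pairwise_append]
        refine ⟨h, by simp, ?_⟩
        intro x hx y hy
        simp at hy
        subst hy
        have := hlt x hx
        push_cast at this ⊢
        omega
      · intro x hx
        rw [List.map_append] at hx
        rcases List.mem_append.1 hx with hx | hx
        · have := hlt x hx; push_cast at this ⊢; omega
        · simp at hx; subst hx; omega
    simp only [pvSearchA, pvDfs, hbody, PySem.List.foldl_append_eq_flatMap,
      List.filterMap_flatMap]

-- B's level-by-level loop builds the flattened DFS leaves of all its start frames
theorem pvLevels_eq (n : Nat) : ∀ (fs : List (List (Int × Int) × Int)),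
    (PySem.List.pyRange (n : Int) 0 (-1)).foldl (fun fs k => pvStepB k fs) fs
      = fs.flatMap (fun f => pvDfs n f.2 f.1) := by
  induction n with
  | zero =>
    intro fs
    rw [PySem.List.pyRange_neg_one_eq_nil (by norm_num)]
    simp [pvDfs]
  | succ n ih =>
    intro fs
    have hcons : PySem.List.pyRange ((n:Int) + 1) 0 (-1)
        = ((n:Int) + 1) :: PySem.List.pyRange ((n:Int) + 1 - 1) 0 (-1) :=
      PySem.List.pyRange_neg_one_cons (by positivity)
    have hcast : ((n + 1 : Nat) : Int) = (n : Int) + 1 := by push_cast; ring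
    rw [hcast, hcons]
    have hsub : (n:Int) + 1 - 1 = (n : Int) := by ring
    rw [List.foldl_cons, hsub, ih]
    have hw : ((n:Int) + 1 - 1).toNat = n := by omega
    simp only [pvStepB, hw, List.flatMap_assoc]
    congr 1
    funext f
    rw [List.flatMap_map]
    rfl

-- A's while-loop computes the same bound as B's bit_length expression
theorem pvWhile_spec (T : Int) (hT : 0 < T) : ∀ (m k : Nat), 1 ≤ k →
    PySem.Int.bitLength T - k ≤ m → 2 ^ (k - 1) ≤ T.natAbs →
    pvWhileMaxK T k = PySem.Int.bitLength T := by
  intro m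
  induction m with
  | zero =>
    intro k hk hm hinv
    rw [pvWhileMaxK]
    have hlt : T.natAbs < 2 ^ PySem.Int.bitLength T := PySem.Int.lt_two_pow_bitLength T
    have hge : PySem.Int.bitLength T ≤ k := by omega
    have hTk : T < (2:Int) ^ k := by
      have h1 : T.natAbs < 2 ^ k :=
        lt_of_lt_of_le hlt (Nat.pow_le_pow_right (by norm_num) hge)
      have : T = (T.natAbs : Int) := by omega
      rw [this]
      exact_mod_cast h1
    rw [if_neg (by omega)]
    -- k ≤ bitLength: 2^(k-1) ≤ natAbs < 2^bl forces k - 1 < bl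
    have hle : k ≤ PySem.Int.bitLength T := by
      by_contra hc
      push Not at hc
      have : 2 ^ PySem.Int.bitLength T ≤ 2 ^ (k - 1) :=
        Nat.pow_le_pow_right (by norm_num) (by omega)
      omega
    omega
  | succ m ih =>
    intro k hk hm hinv
    rw [pvWhileMaxK]
    by_cases hcond : (2:Int) ^ k ≤ T
    · have hnat : 2 ^ k ≤ T.natAbs := by
        have : ((2 ^ k : Nat) : Int) ≤ T := by push_cast; exact_mod_cast hcond
        omega
      have hklt : k < PySem.Int.bitLength T := by
        have hlt : T.natAbs < 2 ^ PySem.Int.bitLength T := PySem.Int.lt_two_pow_bitLength T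
        by_contra hc
        push Not at hc
        have : 2 ^ PySem.Int.bitLength T ≤ 2 ^ k := Nat.pow_le_pow_right (by norm_num) hc
        omega
      rw [if_pos hcond]
      exact ih (k + 1) (by omega) (by omega) (by simpa using hnat)
    · rw [if_neg hcond]
      push Not at hcond
      have hlt : T.natAbs < 2 ^ k := by
        have : T < ((2 ^ k : Nat) : Int) := by push_cast; exact_mod_cast hcond
        omega
      have hle : k ≤ PySem.Int.bitLength T := by
        by_contra hc
        push Not at hc
        have h2 : 2 ^ PySem.Int.bitLength T ≤ 2 ^ (k - 1) :=
          Nat.pow_le_pow_right (by norm_num) (by omega)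
        have hbl : T.natAbs < 2 ^ PySem.Int.bitLength T := PySem.Int.lt_two_pow_bitLength T
        omega
      have hge : PySem.Int.bitLength T ≤ k := by
        by_contra hc
        push Not at hc
        have h2 : 2 ^ k ≤ 2 ^ (PySem.Int.bitLength T - 1) :=
          Nat.pow_le_pow_right (by norm_num) (by omega)
        have hbl : 2 ^ (PySem.Int.bitLength T - 1) ≤ T.natAbs :=
          PySem.Int.two_pow_bitLength_le T (by omega)
        omega
      omega

theorem pvMaxK (T : Int) :
    pvWhileMaxK T 1 = if 0 < T then PySem.Int.bitLength T else 1 := by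
  by_cases hT : 0 < T
  · rw [if_pos hT]
    exact pvWhile_spec T hT (PySem.Int.bitLength T) 1 le_rfl (by omega) (by simp; omega)
  · rw [if_neg hT, pvWhileMaxK, if_neg (by push Not at hT; nlinarith)]

-- ===== VERDICT (by name: the statement is the Claim_ definition above) =====
theorem explain_infeasibility_spec : Claim_equal_explain_infeasibility := by
  unfold Claim_equal_explain_infeasibility Spec_explain_infeasibility
  intro H _
  have key : ∀ T : Int, pvSearchA (pvWhileMaxK T 1) T [] [] =
      ((((PySem.List.pyRange ((if 0 < T then PySem.Int.bitLength T else 1 : Nat) : Int) 0 (-1)).foldl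
          (fun fs k => pvStepB k fs) [([], T)]).filter (fun f => f.2 == 0)).map (fun f => f.1)).foldl
        (fun acc vals => match pvLeafB vals with | some r => acc ++ [r] | none => acc) [] := by
    intro T
    rw [pvMaxK]
    rw [pvSearchA_eq _ _ _ _ (by simp) (by simp)]
    rw [pvFoldOpt _ [], pvFilterMapFst, pvLevels_eq]
    simp
  unfold explain_infeasibility explain_infeasibility_alt
  exact key _
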